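-- pv_equiv track=rewrite | github.com/FrunzyR/Matrici-pbinfo | 666/main.py | even_index
-- ===== SOURCE A (Python) =====
-- from math import sqrt
--
-- def is_prime(n):
--     if n < 2:
--         return False
--     if n == 2:
--         return True
--     if n % 2 == 0:
--         return False
--     if n == 3:
--         return True
--     for i in range(2, int(sqrt(n)) + 1):
--         if n % i == 0:
--             return False
--     return True
--
-- def even_index(matrix):
--     cont = 0
--     for i in range(1, len(matrix)+1):
--         if i % 2 == 0:
--             for j in range(1, len(matrix[i-1])+1):
--                 if is_prime(matrix[i-1][j-1]):
--                     cont += 1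
--     return cont
-- ===== SOURCE B (Python) =====
-- from math import isqrt
--
--
-- def even_index(matrix):
--     vals = [x for row in matrix[1::2] for x in row]
--     top = max(vals, default=0)
--     limit = isqrt(top) if top > 0 else 0
--     primes = []
--     for k in range(2, limit + 1):
--         if all(k % p for p in primes if p * p <= k):
--             primes.append(k)
--     return sum(1 for x in vals
--                if x >= 2 and all(x % p for p in primes if p * p <= x))
-- ===== Notes on version B (the rewrite author's own statement) =====
-- stated objective: alternative
-- what changed: B stages the work: it flattens matrix[1::2], takes the maximum, builds the list of primes up to isqrt(max) once (trial-dividing each candidate only by the previously found primes), then counts even-row values by that prime-table test, instead of A's per-element trial division over the full range 2..sqrt(n) inside nested 1-based index loops.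
import Mathlib
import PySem

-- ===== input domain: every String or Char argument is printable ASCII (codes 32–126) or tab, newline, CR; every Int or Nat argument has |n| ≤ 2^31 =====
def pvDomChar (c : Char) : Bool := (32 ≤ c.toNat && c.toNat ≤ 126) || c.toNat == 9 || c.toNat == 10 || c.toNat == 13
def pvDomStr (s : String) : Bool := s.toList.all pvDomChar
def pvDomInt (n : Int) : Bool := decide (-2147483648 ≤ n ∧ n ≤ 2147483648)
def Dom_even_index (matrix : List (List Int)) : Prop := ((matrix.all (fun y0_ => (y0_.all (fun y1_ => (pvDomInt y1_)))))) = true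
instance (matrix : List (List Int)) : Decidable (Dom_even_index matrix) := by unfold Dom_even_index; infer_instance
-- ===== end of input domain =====

-- B replaces A's per-element √n trial division inside 1-based index loops by a staged pass:
-- flatten matrix[1::2], take the maximum, build a table of the primes up to isqrt(max) once
-- (trial-dividing candidates by the previously found primes only), then count the even-row
-- values that pass the prime-table test; objective: an alternative algorithm (not faster).

-- ===== PORT A =====
-- early-exit loop of is_prime: 'for i in range(...): if n % i == 0: return False'
def aTrial (n : Int) : List Int → Bool
  | [] => true
  | i :: rest => if PySem.Int.mod n i = 0 then false else aTrial n rest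

-- int(sqrt(n)) ported as Nat.sqrt: exact on the domain |n| ≤ 2^31 (double sqrt is correctly
-- rounded, so int(sqrt(n)) is the integer square root there).
def is_prime (n : Int) : Bool :=
  if n < 2 then false
  else if n = 2 then true
  else if PySem.Int.mod n 2 = 0 then false
  else if n = 3 then true
  else aTrial n (PySem.List.pyRange 2 ((Nat.sqrt n.toNat : Int) + 1) 1)

def even_index (matrix : List (List Int)) : Int :=
  (PySem.List.pyRange 1 ((matrix.length : Int) + 1) 1).foldl
    (fun cont i =>
      if PySem.Int.mod i 2 = 0 then
        (PySem.List.pyRange 1 (((PySem.List.pyGetD matrix (i - 1) []).length : Int) + 1) 1).foldl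
          (fun c j =>
            if is_prime (PySem.List.pyGetD (PySem.List.pyGetD matrix (i - 1) []) (j - 1) 0)
            then c + 1 else c)
          cont
      else cont)
    0

-- ===== PORT B =====
-- vals = [x for row in matrix[1::2] for x in row]; step 2 ≠ 0, so slice? is always 'some'
def altVals (matrix : List (List Int)) : List Int :=
  ((PySem.List.slice? matrix (some 1) none 2).getD []).flatMap (fun row => row)

-- limit = isqrt(top) if top > 0 else 0   (math.isqrt IS the integer square root, Nat.sqrt)
def altLimit (top : Int) : Int := if 0 < top then (Nat.sqrt top.toNat : Int) else 0

-- loop body: append k to the table iff no tabled prime p with p*p <= k divides k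
def altInsert (primes : List Int) (k : Int) : List Int :=
  if (primes.filter (fun p => decide (p * p ≤ k))).all (fun p => !decide (PySem.Int.mod k p = 0))
  then primes ++ [k] else primes

-- 'for k in range(2, limit + 1): if all(...): primes.append(k)'
def altTable (limit : Int) : List Int :=
  (PySem.List.pyRange 2 (limit + 1) 1).foldl altInsert []

-- 'sum(1 for x in vals if x >= 2 and all(x % p for p in primes if p * p <= x))'
def altCount (vals primes : List Int) : Int :=
  (vals.countP (fun x => decide (2 ≤ x) &&
    (primes.filter (fun p => decide (p * p ≤ x))).all (fun p => !decide (PySem.Int.mod x p = 0))) : Nat)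

def even_index_alt (matrix : List (List Int)) : Int :=
  altCount (altVals matrix)
    (altTable (altLimit (PySem.List.maxD (altVals matrix) (fun x => x) 0)))

-- ===== PRECONDITION & SPEC =====
def Spec_even_index (matrix : List (List Int)) (out : Int) : Prop := out = even_index_alt matrix
instance (matrix : List (List Int)) (out : Int) : Decidable (Spec_even_index matrix out) := by unfold Spec_even_index; infer_instance

-- ===== CLAIM (what is proved, stated in full; the proofs are below) =====
def Claim_equal_even_index : Prop := ∀ (matrix : List (List Int)), Dom_even_index matrix → Spec_even_index matrix (even_index matrix)

-- ===== LEMMAS AND PROOFS =====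

-- every second element, beginning with the head iff b
def select {α : Type} : Bool → List α → List α
  | _, [] => []
  | b, x :: xs => if b then x :: select (!b) xs else select (!b) xs

-- A's early-exit trial loop is an 'all'
lemma aTrial_eq_all (n : Int) (l : List Int) :
    aTrial n l = l.all (fun i => !(PySem.Int.mod n i = 0)) := by
  induction l with
  | nil => rfl
  | cons i rest ih =>
    simp only [aTrial, List.all_cons]
    by_cases h : PySem.Int.mod n i = 0 <;> simp [h, ih]

-- divisibility by a Nat, read on the Int side
lemma natCast_dvd_int (m : Nat) (x : Int) (hx : 0 ≤ x) : ((m : Int) ∣ x) ↔ m ∣ x.toNat := by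
  conv_lhs => rw [← Int.toNat_of_nonneg hx]
  exact Int.natCast_dvd_natCast

-- n ≥ 2 is prime iff no prime q with q² ≤ n divides it
lemma prime_iff_no_prime_divisor (n : Nat) (hn : 2 ≤ n) :
    n.Prime ↔ ∀ q : Nat, q.Prime → q * q ≤ n → ¬ q ∣ n := by
  constructor
  · intro hp q hq hqq hdvd
    have he : q = n := (Nat.prime_dvd_prime_iff_eq hq hp).mp hdvd
    subst he
    nlinarith [hq.two_le]
  · intro h
    by_contra hnp
    have h1 : n.minFac.Prime := Nat.minFac_prime (by omega)
    have h3 : n.minFac * n.minFac ≤ n := by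
      have := Nat.minFac_sq_le_self (by omega) hnp
      nlinarith [this]
    exact h _ h1 h3 (Nat.minFac_dvd n)

-- A's trial division over 2..int(sqrt n) decides primality of n ≥ 2
lemma trial_eq_prime (n : Int) (hn : 2 ≤ n) :
    aTrial n (PySem.List.pyRange 2 ((Nat.sqrt n.toNat : Int) + 1) 1)
      = decide (Nat.Prime n.toNat) := by
  rw [aTrial_eq_all, Bool.eq_iff_iff, List.all_eq_true, decide_eq_true_iff]
  constructor
  · intro h
    rw [Nat.prime_def_le_sqrt]
    refine ⟨by omega, ?_⟩
    intro m hm2 hms hdvd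
    have hmem : (m : Int) ∈ PySem.List.pyRange 2 ((Nat.sqrt n.toNat : Int) + 1) 1 := by
      rw [PySem.List.mem_pyRange_one]
      constructor
      · exact_mod_cast hm2
      · have : m < Nat.sqrt n.toNat + 1 := by omega
        exact_mod_cast this
    have hh := h _ hmem
    simp only [Bool.not_eq_eq_eq_not, Bool.not_true, decide_eq_false_iff_not] at hh
    exact hh ((PySem.Int.mod_eq_zero_iff_dvd n m).mpr
      ((natCast_dvd_int m n (by omega)).mpr hdvd))
  · intro hpr i hi
    rw [PySem.List.mem_pyRange_one] at hi
    simp only [Bool.not_eq_eq_eq_not, Bool.not_true, decide_eq_false_iff_not]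
    intro hmod
    have hdvd : i ∣ n := (PySem.Int.mod_eq_zero_iff_dvd n i).mp hmod
    have h2 := (Nat.prime_def_le_sqrt.mp hpr).2 i.toNat
      (by omega) (by omega)
    apply h2
    rw [← natCast_dvd_int i.toNat n (by omega), Int.toNat_of_nonneg (by omega)]
    exact hdvd

-- A's is_prime characterized
lemma is_prime_eq (n : Int) : is_prime n = decide (2 ≤ n ∧ Nat.Prime n.toNat) := by
  unfold is_prime
  by_cases hlt : n < 2
  · simp [hlt, show ¬ (2 ≤ n) by omega]
  by_cases h2 : n = 2
  · subst h2; simp [Nat.prime_two]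
  by_cases hev : PySem.Int.mod n 2 = 0
  · have hdvd : (2 : Nat) ∣ n.toNat := (natCast_dvd_int 2 n (by omega)).mp
      ((PySem.Int.mod_eq_zero_iff_dvd n 2).mp hev)
    simp only [if_neg hlt, if_neg h2, if_pos hev, eq_comm (a := false),
      decide_eq_false_iff_not, not_and]
    intro _ hpr
    rcases (Nat.Prime.eq_one_or_self_of_dvd hpr 2 hdvd) with h | h <;> omega
  by_cases h3 : n = 3
  · subst h3; simp [Nat.prime_three]
  · rw [if_neg hlt, if_neg h2, if_neg hev, if_neg h3, trial_eq_prime n (by omega)]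
    simp [show 2 ≤ n by omega]

-- the prime-table membership test of B decides primality, for any table that contains
-- (at least) every prime q with q² ≤ x and nothing but primes ≥ 2
lemma table_all_eq (x : Int) (table : List Int) (hx : 2 ≤ x)
    (hp : ∀ p ∈ table, Nat.Prime p.toNat ∧ 2 ≤ p)
    (hc : ∀ q : Nat, q.Prime → (q : Int) * q ≤ x → (q : Int) ∈ table) :
    ((table.filter (fun p => decide (p * p ≤ x))).all (fun p => !decide (PySem.Int.mod x p = 0)))
      = decide (Nat.Prime x.toNat) := by
  rw [Bool.eq_iff_iff, List.all_eq_true, decide_eq_true_iff]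
  constructor
  · intro h
    rw [prime_iff_no_prime_divisor x.toNat (by omega)]
    intro q hq hqq hdvd
    have hqx : (q : Int) * q ≤ x := by
      have : ((q * q : Nat) : Int) ≤ ((x.toNat : Nat) : Int) := by exact_mod_cast hqq
      push_cast at this
      omega
    have hmemf : (q : Int) ∈ table.filter (fun p => decide (p * p ≤ x)) :=
      List.mem_filter.mpr ⟨hc q hq hqx, by simpa using hqx⟩
    have hh := h _ hmemf
    simp only [Bool.not_eq_eq_eq_not, Bool.not_true, decide_eq_false_iff_not] at hh
    exact hh ((PySem.Int.mod_eq_zero_iff_dvd x q).mpr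
      ((natCast_dvd_int q x (by omega)).mpr hdvd))
  · intro hpr p hpf
    obtain ⟨hpmem, hple⟩ := List.mem_filter.mp hpf
    obtain ⟨hpp, hp2⟩ := hp p hpmem
    simp only [decide_eq_true_iff] at hple
    simp only [Bool.not_eq_eq_eq_not, Bool.not_true, decide_eq_false_iff_not]
    intro hmod
    have hdvd : p.toNat ∣ x.toNat := (natCast_dvd_int p.toNat x (by omega)).mp
      (by rw [Int.toNat_of_nonneg (by omega : (0:Int) ≤ p)]
          exact (PySem.Int.mod_eq_zero_iff_dvd x p).mp hmod)
    have hsq : p.toNat * p.toNat ≤ x.toNat := by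
      have : ((p.toNat * p.toNat : Nat) : Int) ≤ ((x.toNat : Nat) : Int) := by
        push_cast
        rw [Int.toNat_of_nonneg (by omega : (0:Int) ≤ p), Int.toNat_of_nonneg (by omega : (0:Int) ≤ x)]
        exact hple
      exact_mod_cast this
    exact (prime_iff_no_prime_divisor x.toNat (by omega)).mp hpr p.toNat hpp hsq hdvd

-- the incremental table holds exactly the primes of 2..L
lemma altTable_eq (L : Nat) :
    altTable (L : Int)
      = (PySem.List.pyRange 2 ((L : Int) + 1) 1).filter (fun k => decide (Nat.Prime k.toNat)) := by
  induction L with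
  | zero =>
    rw [show ((0 : Nat) : Int) + 1 = 1 from by norm_num,
      PySem.List.pyRange_one_eq_nil (by norm_num)]
    rfl
  | succ L ih =>
    rcases Nat.eq_zero_or_pos L with hL | hL
    · subst hL
      rw [show ((1 : Nat) : Int) + 1 = 2 from by norm_num,
        PySem.List.pyRange_one_eq_nil (by norm_num)]
      rfl
    · have hk2 : (2 : Int) ≤ (L : Int) + 1 := by omega
      have hsplit : PySem.List.pyRange 2 (((L + 1 : Nat) : Int) + 1) 1
          = PySem.List.pyRange 2 ((L : Int) + 1) 1 ++ [(L : Int) + 1] := by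
        rw [show ((L + 1 : Nat) : Int) + 1 = ((L : Int) + 1) + 1 from by push_cast; ring]
        exact PySem.List.pyRange_one_succ_right hk2
      set k : Int := (L : Int) + 1 with hkdef
      unfold altTable at ih ⊢
      rw [hsplit, List.foldl_append, List.filter_append, ih, List.foldl_cons, List.foldl_nil]
      have hcond : ((((PySem.List.pyRange 2 ((L : Int) + 1) 1).filter
            (fun k => decide (Nat.Prime k.toNat))).filter (fun p => decide (p * p ≤ k))).all
            (fun p => !decide (PySem.Int.mod k p = 0)))
          = decide (Nat.Prime k.toNat) := by
        refine table_all_eq k _ ?_ ?_ ?_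
        · omega
        · intro p hpm
          obtain ⟨hpr, hppr⟩ := List.mem_filter.mp hpm
          refine ⟨by simpa using hppr, ?_⟩
          exact ((PySem.List.mem_pyRange_one).mp hpr).1
        · intro q hq hqq
          have hq2 : 2 ≤ q := hq.two_le
          have hqlt : (q : Int) < (L : Int) + 1 := by
            have h2q : 2 * (q : Int) ≤ (q : Int) * q := by nlinarith [hq2]
            omega
          refine List.mem_filter.mpr ⟨(PySem.List.mem_pyRange_one).mpr ⟨by exact_mod_cast hq2, hqlt⟩, ?_⟩
          simpa using hq
      unfold altInsert
      rw [hcond]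
      by_cases hk : Nat.Prime k.toNat
      · simp [hk]
      · simp [hk]

lemma altLimit_natCast (top : Int) :
    altLimit top = ((if 0 < top then Nat.sqrt top.toNat else 0 : Nat) : Int) := by
  unfold altLimit; split <;> simp

-- xs[1::2] written as an indexed filterMap
lemma slice_form (xs : List (List Int)) :
    (PySem.List.slice? xs (some 1) none 2).getD [] =
    (List.range (xs.length / 2)).filterMap (fun k => xs[1 + 2*k]?) := by
  cases xs with
  | nil => rfl
  | cons x t =>
    simp only [PySem.List.slice?, PySem.List.sliceIndices, List.length_cons]
    norm_num
    congr 1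
    · congr 1
      split_ifs with h <;> omega

-- … and that filterMap is 'select false'
lemma filterMap_odds {α : Type} (xs : List α) :
    (List.range (xs.length / 2)).filterMap (fun k => xs[1 + 2*k]?) = select false xs := by
  match xs with
  | [] => simp [select]
  | [x] => simp [select]
  | x :: y :: t =>
    have h2 : (x :: y :: t).length / 2 = t.length / 2 + 1 := by simp; omega
    rw [h2, List.range_succ_eq_map]
    simp only [List.filterMap_cons, List.filterMap_map]
    have hsh : ∀ k : Nat, ((x :: y :: t)[1 + 2 * (k+1)]? ) = t[1 + 2*k]? := by
      intro k
      have h3 : 1 + 2 * (k+1) = (1 + 2*k) + 2 := by omega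
      rw [h3]
      rfl
    simp only [Function.comp_def, Nat.succ_eq_add_one, hsh]
    simp [select, filterMap_odds t]

-- xs[z] on a cons, for a positive index
lemma pyGetD_shift {α : Type} (x : α) (xs : List α) (z : Int) (d : α) (hz : 1 ≤ z) :
    PySem.List.pyGetD (x :: xs) z d = PySem.List.pyGetD xs (z - 1) d := by
  obtain ⟨m, rfl⟩ : ∃ m : Nat, z = (m : Int) + 1 := ⟨(z - 1).toNat, by omega⟩
  have h1 : (m : Int) + 1 = ((m + 1 : Nat) : Int) := by push_cast; ring
  have h2 : (m : Int) + 1 - 1 = (m : Int) := by ring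
  rw [h2, h1, PySem.List.pyGetD_natCast, PySem.List.pyGetD_natCast, List.getD_cons_succ]

-- A's inner loop counts the primes of one row
lemma inner_count (row : List Int) (c : Int) :
    (PySem.List.pyRange 1 ((row.length : Int) + 1) 1).foldl
      (fun c2 j => if is_prime (PySem.List.pyGetD row (j - 1) 0) then c2 + 1 else c2) c
    = c + (row.countP is_prime : Int) := by
  have h1 : PySem.List.pyRange 1 ((row.length : Int) + 1) 1
      = (PySem.List.pyRange 0 (row.length : Int) 1).map (fun j => j + 1) := by
    rw [PySem.List.pyRange_one, PySem.List.pyRange_one]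
    simp [List.map_map, Function.comp_def]
    exact fun a _ => by omega
  rw [h1, List.foldl_map]
  simp only [add_sub_cancel_right]
  have h2 := PySem.List.foldl_pyRange_zero_pyGetD row 0
    (fun c2 x => if is_prime x then c2 + 1 else c2) c
  simp only [PySem.List.len_eq] at h2 ⊢
  rw [h2, PySem.List.foldl_if_add_one]

-- A's outer loop, generalized over a start offset k: it counts the primes of the rows
-- at the 1-based even positions of the remaining suffix
lemma outer_gen (m : List (List Int)) (k : Nat) (c : Int) :
    (PySem.List.pyRange ((k : Int) + 1) ((k : Int) + (m.length : Int) + 1) 1).foldl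
      (fun cont i =>
        if PySem.Int.mod i 2 = 0 then
          (PySem.List.pyRange 1 (((PySem.List.pyGetD m (i - 1 - (k : Int)) []).length : Int) + 1) 1).foldl
            (fun c2 j =>
              if is_prime (PySem.List.pyGetD (PySem.List.pyGetD m (i - 1 - (k : Int)) []) (j - 1) 0)
              then c2 + 1 else c2)
            cont
        else cont) c
    = c + (((select (decide ((k + 1) % 2 = 0)) m).flatMap (fun r => r)).countP is_prime : Int) := by
  induction m generalizing k c with
  | nil =>
    rw [PySem.List.pyRange_one_eq_nil (by simp)]
    simp [select]
  | cons row rest ih =>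
    have hmodc : PySem.Int.mod ((k : Int) + 1) 2 = (((k + 1) % 2 : Nat) : Int) := by
      have h1 : (k : Int) + 1 = ((k + 1 : Nat) : Int) := by push_cast; ring
      rw [h1]
      exact_mod_cast PySem.Int.mod_natCast (k + 1) 2
    have hshift : ∀ (c0 : Int),
        (PySem.List.pyRange ((k : Int) + 2) ((k : Int) + (rest.length : Int) + 2) 1).foldl
          (fun cont i =>
            if PySem.Int.mod i 2 = 0 then
              (PySem.List.pyRange 1 (((PySem.List.pyGetD (row :: rest) (i - 1 - (k : Int)) []).length : Int) + 1) 1).foldl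
                (fun c2 j =>
                  if is_prime (PySem.List.pyGetD (PySem.List.pyGetD (row :: rest) (i - 1 - (k : Int)) []) (j - 1) 0)
                  then c2 + 1 else c2)
                cont
            else cont) c0
        = c0 + (((select (decide ((k + 2) % 2 = 0)) rest).flatMap (fun r => r)).countP is_prime : Int) := by
      intro c0
      have hcong := PySem.List.foldl_congr_mem
        (PySem.List.pyRange ((k : Int) + 2) ((k : Int) + (rest.length : Int) + 2) 1)
        (fun cont i =>
            if PySem.Int.mod i 2 = 0 then
              (PySem.List.pyRange 1 (((PySem.List.pyGetD (row :: rest) (i - 1 - (k : Int)) []).length : Int) + 1) 1).foldl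
                (fun c2 j =>
                  if is_prime (PySem.List.pyGetD (PySem.List.pyGetD (row :: rest) (i - 1 - (k : Int)) []) (j - 1) 0)
                  then c2 + 1 else c2)
                cont
            else cont)
        (fun cont i =>
            if PySem.Int.mod i 2 = 0 then
              (PySem.List.pyRange 1 (((PySem.List.pyGetD rest (i - 1 - ((k + 1 : Nat) : Int)) []).length : Int) + 1) 1).foldl
                (fun c2 j =>
                  if is_prime (PySem.List.pyGetD (PySem.List.pyGetD rest (i - 1 - ((k + 1 : Nat) : Int)) []) (j - 1) 0)
                  then c2 + 1 else c2)
                cont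
            else cont)
        c0 ?_
      · rw [hcong]
        have hIH := ih (k + 1) c0
        have harg : ((k + 1 : Nat) : Int) + 1 = (k : Int) + 2 := by push_cast; ring
        have harg2 : ((k + 1 : Nat) : Int) + (rest.length : Int) + 1 = (k : Int) + (rest.length : Int) + 2 := by push_cast; ring
        rw [harg, harg2] at hIH
        rw [hIH]
      · intro acc i hi
        rw [PySem.List.mem_pyRange_one] at hi
        have hg : PySem.List.pyGetD (row :: rest) (i - 1 - (k : Int)) []
            = PySem.List.pyGetD rest (i - 1 - ((k + 1 : Nat) : Int)) [] := by
          rw [pyGetD_shift _ _ _ _ (by omega)]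
          congr 1
          push_cast
          ring
        simp only [hg]
    have hlen2 : (k : Int) + (((row :: rest).length : Nat) : Int) + 1 = (k : Int) + (rest.length : Int) + 2 := by
      simp; ring
    rw [hlen2, PySem.List.pyRange_one_cons (by omega), List.foldl_cons]
    rw [show (k : Int) + 1 + 1 = (k : Int) + 2 from by ring]
    rw [show (k : Int) + 1 - 1 - (k : Int) = 0 from by ring]
    rw [PySem.List.pyGetD_zero_cons, hmodc]
    by_cases hb : (k + 1) % 2 = 0
    · rw [if_pos (by exact_mod_cast congrArg (Nat.cast : Nat → Int) hb), inner_count, hshift]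
      have hsel : select (decide ((k + 1) % 2 = 0)) (row :: rest)
          = row :: select (decide ((k + 2) % 2 = 0)) rest := by
        simp [select, hb, show (k + 2) % 2 = 1 from by omega]
      rw [hsel]
      simp only [List.flatMap_cons, List.countP_append]
      push_cast
      ring
    · rw [if_neg (fun h => hb (by exact_mod_cast h)), hshift]
      have hsel : select (decide ((k + 1) % 2 = 0)) (row :: rest)
          = select (decide ((k + 2) % 2 = 0)) rest := by
        simp [select, hb, show (k + 2) % 2 = 0 from by omega]
      rw [hsel]

-- ===== VERDICT (by name: the statement is the Claim_ definition above) =====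
theorem even_index_spec : Claim_equal_even_index := by
  intro matrix _
  unfold Spec_even_index even_index even_index_alt
  have h0 := outer_gen matrix 0 0
  simp only [Nat.cast_zero, zero_add, sub_zero] at h0
  rw [h0]
  have hvals : altVals matrix = (select false matrix).flatMap (fun r => r) := by
    unfold altVals
    rw [slice_form, filterMap_odds]
  rw [show (select (decide ((0 + 1) % 2 = 0)) matrix) = select false matrix from by norm_num,
    ← hvals]
  unfold altCount
  congr 1
  apply List.countP_congr
  intro x hx
  -- the bound x ≤ top from max(vals, default=0)
  have hne : altVals matrix ≠ [] := List.ne_nil_of_mem hx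
  have hxtop : x ≤ PySem.List.maxD (altVals matrix) (fun x => x) 0 := by
    unfold PySem.List.maxD
    cases hm : PySem.List.max? (altVals matrix) (fun x => x) with
    | none => exact absurd ((PySem.List.max?_eq_none_iff _ _).mp hm) hne
    | some m => simpa using PySem.List.max?_isMax hm x hx
  set top := PySem.List.maxD (altVals matrix) (fun x => x) 0 with htop
  rw [is_prime_eq]
  by_cases hx2 : 2 ≤ x
  · have htop0 : 0 < top := by omega
    have hLdef : altLimit top = ((Nat.sqrt top.toNat : Nat) : Int) := by
      rw [altLimit_natCast, if_pos htop0]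
    rw [hLdef, altTable_eq]
    have htab := table_all_eq x
      ((PySem.List.pyRange 2 ((Nat.sqrt top.toNat : Int) + 1) 1).filter
        (fun k => decide (Nat.Prime k.toNat))) hx2
      (by
        intro p hpm
        obtain ⟨hpr, hppr⟩ := List.mem_filter.mp hpm
        exact ⟨by simpa using hppr, ((PySem.List.mem_pyRange_one).mp hpr).1⟩)
      (by
        intro q hq hqq
        have hq2 : 2 ≤ q := hq.two_le
        have hsq : q * q ≤ top.toNat := by
          have h1 : (q : Int) * q ≤ top := le_trans hqq hxtop
          have h2 : ((q * q : Nat) : Int) ≤ ((top.toNat : Nat) : Int) := by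
            push_cast
            omega
          exact_mod_cast h2
        have hqL : q ≤ Nat.sqrt top.toNat := Nat.le_sqrt.mpr hsq
        refine List.mem_filter.mpr ⟨(PySem.List.mem_pyRange_one).mpr
          ⟨by exact_mod_cast hq2, by exact_mod_cast Nat.lt_succ_of_le hqL⟩, ?_⟩
        simpa using hq)
    rw [htab]
    simp [hx2]
  · simp [hx2]
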